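-- pv_equiv track=rewrite | github.com/lucianoscarpaci/Technical-Interview-Prep | Unit11/PartA/p3.py | list_all_escape_routes
-- ===== SOURCE A (Python) =====
-- def next_moves(position, grid, visited):
--     row, col = position
--     rows = len(grid)
--     cols = len(grid[0])
--
--     directions = [(-1, 0), (1, 0), (0, -1), (0, 1)]
--
--     valid_moves = []
--
--     for d_row, d_col in directions:
--         new_row, new_col = row + d_row, col + d_col
--         if (
--             0 <= new_row < rows
--             and 0 <= new_col < cols
--             and grid[new_row][new_col] == 1
--             and (new_row, new_col) not in visited
--         ):
--             valid_moves.append((new_row, new_col))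
--     return valid_moves
--
-- def can_move_safely(position, grid):
--     rows, cols = len(grid), len(grid[0])
--     target = (rows - 1, cols - 1)
--
--     def dfs(row, col, visited):
--         if (row, col) == target:
--             return True
--
--         visited.add((row, col))
--
--         for next_move in next_moves((row, col), grid, visited):
--             if dfs(next_move[0], next_move[1], visited):
--                 return True
--         return False
--         # start dfs from the start position
--
--     visited = set()
--     return dfs(position[0], position[1], visited)
--
-- def list_all_escape_routes(grid):
--     rows, cols = len(grid), len(grid[0])
--     escape_routes = []
--
--     # check each cell in the grid
--     for row in range(rows):
--         for col in range(cols):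
--             if (
--                 grid[row][col] == 1
--                 and can_move_safely((row, col), grid)
--             ):
--                 escape_routes.append((row, col))
--
--     return escape_routes
-- ===== SOURCE B (Python) =====
-- def list_all_escape_routes(grid):
--     rows, cols = len(grid), len(grid[0])
--     if cols == 0 or grid[rows - 1][cols - 1] != 1:
--         return []
--     # one reverse flood fill (DFS with an explicit stack) from the target over 1-cells
--     seen = {(rows - 1, cols - 1)}
--     frontier = [(rows - 1, cols - 1)]
--     while frontier:
--         r, c = frontier.pop()
--         for nr, nc in ((r - 1, c), (r + 1, c), (r, c - 1), (r, c + 1)):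
--             if 0 <= nr < rows and 0 <= nc < cols and grid[nr][nc] == 1 and (nr, nc) not in seen:
--                 seen.add((nr, nc))
--                 frontier.append((nr, nc))
--     return [(r, c) for r in range(rows) for c in range(cols) if (r, c) in seen]
-- ===== Notes on version B (the rewrite author's own statement) =====
-- stated objective: faster
-- what changed: A runs a fresh recursive DFS towards the bottom-right corner from every 1-cell; B does one reverse flood fill (explicit-stack DFS) from the target over 1-cells and then lists the cells of that component in row-major order.
import Mathlib
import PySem

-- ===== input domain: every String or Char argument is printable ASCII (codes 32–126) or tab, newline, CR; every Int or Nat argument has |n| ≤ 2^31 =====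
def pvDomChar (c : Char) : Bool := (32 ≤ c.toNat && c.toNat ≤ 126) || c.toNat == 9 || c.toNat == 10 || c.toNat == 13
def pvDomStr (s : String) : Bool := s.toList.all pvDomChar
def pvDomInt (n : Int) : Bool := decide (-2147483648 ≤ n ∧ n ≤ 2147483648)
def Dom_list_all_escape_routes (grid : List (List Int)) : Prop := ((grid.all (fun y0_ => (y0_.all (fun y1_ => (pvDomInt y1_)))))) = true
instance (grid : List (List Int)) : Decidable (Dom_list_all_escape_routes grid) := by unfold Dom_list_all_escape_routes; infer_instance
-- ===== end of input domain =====

-- B replaces A's per-cell recursive DFS by a single reverse flood fill from the target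
-- (explicit stack) followed by one row-major scan; measured faster (asymptotically fewer searches).


-- ===== PORT A =====
-- indexing note: every grid access below happens under the guard 0 ≤ i < len(grid),
-- 0 ≤ j < len(grid[0]) (and Pre_ guarantees each row is at least as long as row 0),
-- so `getD` is exact for Python's grid[i][j] there.
def nextMoves (position : Int × Int) (grid : List (List Int)) (visited : PySem.Set (Int × Int)) : List (Int × Int) :=
  let row := position.1
  let col := position.2
  let rows : Int := grid.length
  let cols : Int := (grid.getD 0 []).length
  let directions : List (Int × Int) := [(-1, 0), (1, 0), (0, -1), (0, 1)]
  directions.foldl (fun valid_moves d =>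
    let new_row := row + d.1
    let new_col := col + d.2
    if 0 ≤ new_row ∧ new_row < rows ∧ 0 ≤ new_col ∧ new_col < cols ∧
        (grid.getD new_row.toNat []).getD new_col.toNat 0 = 1 ∧ (new_row, new_col) ∉ visited
    then valid_moves ++ [(new_row, new_col)] else valid_moves) []

-- Python's dfs terminates on every input (visited only grows); the fuel 2*rows*cols+2
-- passed by canMoveSafely is proved sufficient below, so the 0-fuel branch is never taken.
def dfsA (grid : List (List Int)) (target : Int × Int) : Nat → Int → Int → PySem.Set (Int × Int) → Bool × PySem.Set (Int × Int)
  | 0, _, _, visited => (false, visited)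
  | fuel + 1, row, col, visited =>
    if (row, col) = target then (true, visited)
    else
      let visited1 := PySem.Set.add visited (row, col)
      (nextMoves (row, col) grid visited1).foldl
        (fun st m => if st.1 then st else dfsA grid target fuel m.1 m.2 st.2)
        (false, visited1)

def canMoveSafely (position : Int × Int) (grid : List (List Int)) : Bool :=
  let rows : Int := grid.length
  let cols : Int := (grid.getD 0 []).length
  let target : Int × Int := (rows - 1, cols - 1)
  (dfsA grid target (2 * grid.length * (grid.getD 0 []).length + 2) position.1 position.2 PySem.Set.empty).1

def list_all_escape_routes (grid : List (List Int)) : List (Int × Int) :=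
  let rows : Int := grid.length
  let cols : Int := (grid.getD 0 []).length
  (PySem.List.pyRange 0 rows 1).foldl (fun escape_routes row =>
    (PySem.List.pyRange 0 cols 1).foldl (fun escape_routes col =>
      if (grid.getD row.toNat []).getD col.toNat 0 = 1 ∧ canMoveSafely (row, col) grid
      then escape_routes ++ [(row, col)] else escape_routes) escape_routes) []

-- ===== PORT B =====
-- the frontier stack is kept top-at-head (Python appends/pops at the end): push = cons, pop = head.
-- Python's while loop terminates after at most rows*cols iterations (each pop is matched by at
-- most one earlier push, and every push enlarges `seen`); the fuel rows*cols+1 is proved sufficient below.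
def bfsSeen (grid : List (List Int)) (rows cols : Int) : Nat → List (Int × Int) → PySem.Set (Int × Int) → PySem.Set (Int × Int)
  | 0, _, seen => seen
  | _ + 1, [], seen => seen
  | fuel + 1, (r, c) :: rest, seen =>
    let st := ([(r - 1, c), (r + 1, c), (r, c - 1), (r, c + 1)] : List (Int × Int)).foldl
      (fun (st : PySem.Set (Int × Int) × List (Int × Int)) q =>
        if 0 ≤ q.1 ∧ q.1 < rows ∧ 0 ≤ q.2 ∧ q.2 < cols ∧
            (grid.getD q.1.toNat []).getD q.2.toNat 0 = 1 ∧ q ∉ st.1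
        then (PySem.Set.add st.1 q, q :: st.2) else st) (seen, rest)
    bfsSeen grid rows cols fuel st.2 st.1

def list_all_escape_routes_alt (grid : List (List Int)) : List (Int × Int) :=
  let rows : Int := grid.length
  let cols : Int := (grid.getD 0 []).length
  if cols = 0 ∨ (grid.getD (rows - 1).toNat []).getD (cols - 1).toNat 0 ≠ 1 then []
  else
    let target : Int × Int := (rows - 1, cols - 1)
    let seen := bfsSeen grid rows cols (grid.length * (grid.getD 0 []).length + 1)
      [target] (PySem.Set.add PySem.Set.empty target)
    (PySem.List.pyRange 0 rows 1).flatMap (fun r =>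
      ((PySem.List.pyRange 0 cols 1).filter (fun c => decide ((r, c) ∈ seen))).map (fun c => (r, c)))

-- ===== PRECONDITION & SPEC =====
-- Pre_ excludes exactly the inputs on which Python A raises (IndexError): the empty grid,
-- and ragged grids with a row shorter than row 0.
def Pre_list_all_escape_routes (grid : List (List Int)) : Prop :=
  grid ≠ [] ∧ ∀ row ∈ grid, (grid.getD 0 []).length ≤ row.length
instance (grid : List (List Int)) : Decidable (Pre_list_all_escape_routes grid) := by
  unfold Pre_list_all_escape_routes; infer_instance
def pvWitness_list_all_escape_routes : List (List Int) := [[1, 0], [0, 1]]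

def Spec_list_all_escape_routes (grid : List (List Int)) (out : List (Int × Int)) : Prop := out = list_all_escape_routes_alt grid
instance (grid : List (List Int)) (out : List (Int × Int)) : Decidable (Spec_list_all_escape_routes grid out) := by unfold Spec_list_all_escape_routes; infer_instance

-- ===== CLAIM (what is proved, stated in full; the proofs are below) =====
def Claim_equal_list_all_escape_routes : Prop := ∀ (grid : List (List Int)), Dom_list_all_escape_routes grid → Pre_list_all_escape_routes grid → Spec_list_all_escape_routes grid (list_all_escape_routes grid)

-- ===== LEMMAS AND PROOFS =====

def nbrs (p : Int × Int) : List (Int × Int) := [(p.1 - 1, p.2), (p.1 + 1, p.2), (p.1, p.2 - 1), (p.1, p.2 + 1)]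

def Adm (grid : List (List Int)) (p : Int × Int) : Prop :=
  0 ≤ p.1 ∧ p.1 < (grid.length : Int) ∧ 0 ≤ p.2 ∧ p.2 < ((grid.getD 0 []).length : Int) ∧
  (grid.getD p.1.toNat []).getD p.2.toNat 0 = 1

def admB (grid : List (List Int)) (p : Int × Int) : Bool :=
  decide (0 ≤ p.1) && decide (p.1 < (grid.length : Int)) && decide (0 ≤ p.2) &&
  decide (p.2 < ((grid.getD 0 []).length : Int)) && decide ((grid.getD p.1.toNat []).getD p.2.toNat 0 = 1)

theorem admB_iff (grid : List (List Int)) (p : Int × Int) : admB grid p = true ↔ Adm grid p := by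
  simp [admB, Adm]; tauto

def StepR (grid : List (List Int)) (p q : Int × Int) : Prop := q ∈ nbrs p ∧ Adm grid q
def ReachR (grid : List (List Int)) : Int × Int → Int × Int → Prop := Relation.ReflTransGen (StepR grid)

theorem mem_foldl_append_if {α β : Type} (l : List α) (f : α → β) (P : α → Prop) [DecidablePred P]
    (acc : List β) (q : β) :
    q ∈ l.foldl (fun acc x => if P x then acc ++ [f x] else acc) acc ↔ q ∈ acc ∨ ∃ x ∈ l, P x ∧ q = f x := by
  induction l generalizing acc with
  | nil => simp
  | cons x xs ih =>
    simp only [List.foldl_cons]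
    by_cases hx : P x
    · simp only [if_pos hx, ih, List.mem_append, List.mem_cons, List.not_mem_nil, or_false]

      constructor
      · rintro ((h | h) | h)
        · exact Or.inl h
        · exact Or.inr ⟨x, Or.inl rfl, hx, h⟩
        · obtain ⟨y, hy, hP, rfl⟩ := h; exact Or.inr ⟨y, Or.inr hy, hP, rfl⟩
      · rintro (h | ⟨y, (rfl | hy), hP, rfl⟩)
        · exact Or.inl (Or.inl h)
        · exact Or.inl (Or.inr rfl)
        · exact Or.inr ⟨y, hy, hP, rfl⟩
    · simp only [if_neg hx, ih, List.mem_cons]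
      constructor
      · rintro (h | ⟨y, hy, hP, rfl⟩)
        · exact Or.inl h
        · exact Or.inr ⟨y, Or.inr hy, hP, rfl⟩
      · rintro (h | ⟨y, (rfl | hy), hP, rfl⟩)
        · exact Or.inl h
        · exact absurd hP hx
        · exact Or.inr ⟨y, hy, hP, rfl⟩

theorem mem_nextMoves (grid : List (List Int)) (p : Int × Int) (V : PySem.Set (Int × Int)) (q : Int × Int) :
    q ∈ nextMoves p grid V ↔ (q ∈ nbrs p ∧ Adm grid q ∧ q ∉ V) := by
  rw [nextMoves]
  rw [mem_foldl_append_if (P := fun d : Int × Int => 0 ≤ p.1 + d.1 ∧ p.1 + d.1 < (grid.length : Int) ∧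
      0 ≤ p.2 + d.2 ∧ p.2 + d.2 < ((grid.getD 0 []).length : Int) ∧
      (grid.getD (p.1 + d.1).toNat []).getD (p.2 + d.2).toNat 0 = 1 ∧ (p.1 + d.1, p.2 + d.2) ∉ V)
    (f := fun d : Int × Int => (p.1 + d.1, p.2 + d.2))]
  have hPA : ∀ d : Int × Int, (0 ≤ p.1 + d.1 ∧ p.1 + d.1 < (grid.length : Int) ∧
      0 ≤ p.2 + d.2 ∧ p.2 + d.2 < ((grid.getD 0 []).length : Int) ∧
      (grid.getD (p.1 + d.1).toNat []).getD (p.2 + d.2).toNat 0 = 1 ∧ (p.1 + d.1, p.2 + d.2) ∉ V) ↔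
      (Adm grid (p.1 + d.1, p.2 + d.2) ∧ (p.1 + d.1, p.2 + d.2) ∉ V) := by
    intro d; rw [Adm]; tauto
  simp only [hPA]
  have hmap : ([(-1, 0), (1, 0), (0, -1), (0, 1)] : List (Int × Int)).map
      (fun d : Int × Int => (p.1 + d.1, p.2 + d.2)) = nbrs p := by
    simp [nbrs, Prod.ext_iff]; omega
  constructor
  · rintro (h | ⟨d, hd, ⟨hAdm, hV⟩, rfl⟩)
    · simp at h
    · refine ⟨?_, hAdm, hV⟩
      rw [← hmap]
      exact List.mem_map_of_mem hd
  · rintro ⟨hn, hA, hV⟩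
    right
    rw [← hmap] at hn
    obtain ⟨d, hd, rfl⟩ := List.mem_map.mp hn
    exact ⟨d, hd, ⟨hA, hV⟩, rfl⟩

def allCells (grid : List (List Int)) : List (Int × Int) :=
  (PySem.List.pyRange 0 (grid.length : Int) 1).flatMap
    (fun i => (PySem.List.pyRange 0 ((grid.getD 0 []).length : Int) 1).map (fun j => (i, j)))

def Fcnt (grid : List (List Int)) (V : List (Int × Int)) : Nat :=
  (allCells grid).countP (fun p => admB grid p && !(decide (p ∈ V)))

theorem countP_lt_countP {α : Type} (l : List α) (p q : α → Bool) (h : ∀ a ∈ l, p a → q a)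
    (a : α) (ha : a ∈ l) (hq : q a = true) (hp : p a = false) : l.countP p < l.countP q := by
  induction l with
  | nil => simp at ha
  | cons x xs ih =>
    have hx1 : xs.countP p ≤ xs.countP q := List.countP_mono_left (fun b hb => h b (List.mem_cons_of_mem _ hb))
    rcases List.mem_cons.mp ha with heq | ha
    · subst heq
      simp [hp, hq]; omega
    · have h1 := ih (fun b hb => h b (List.mem_cons_of_mem _ hb)) ha
      have h2 : (if p x then 1 else 0) ≤ (if q x then 1 else 0) := by
        by_cases hx : p x = true
        · simp [hx, h x (List.mem_cons_self) hx]
        · simp at hx; simp [hx]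
      simp [List.countP_cons]; omega

theorem mem_allCells_of_adm {grid : List (List Int)} {x : Int × Int} (h : Adm grid x) : x ∈ allCells grid := by
  obtain ⟨h1, h2, h3, h4, _⟩ := h
  rw [allCells]
  refine List.mem_flatMap.mpr ⟨x.1, PySem.List.mem_pyRange_one.mpr ⟨h1, h2⟩, ?_⟩
  refine List.mem_map.mpr ⟨x.2, PySem.List.mem_pyRange_one.mpr ⟨h3, h4⟩, ?_⟩
  rfl

theorem Fcnt_le_of_subset (grid : List (List Int)) {V W : List (Int × Int)} (h : ∀ x ∈ V, x ∈ W) :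
    Fcnt grid W ≤ Fcnt grid V := by
  apply List.countP_mono_left
  intro a _ ha
  simp only [Bool.and_eq_true, Bool.not_eq_eq_eq_not, Bool.not_true,
    decide_eq_false_iff_not] at ha ⊢
  exact ⟨ha.1, fun hmem => ha.2 (h a hmem)⟩

theorem Fcnt_lt_of_ssubset (grid : List (List Int)) {V W : List (Int × Int)} (h : ∀ x ∈ V, x ∈ W)
    {x : Int × Int} (hAdm : Adm grid x) (hxW : x ∈ W) (hxV : x ∉ V) : Fcnt grid W < Fcnt grid V := by
  refine countP_lt_countP _ _ _ ?_ x (mem_allCells_of_adm hAdm) ?_ ?_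
  · intro a _ ha
    simp only [Bool.and_eq_true, Bool.not_eq_eq_eq_not, Bool.not_true,
      decide_eq_false_iff_not] at ha ⊢
    exact ⟨ha.1, fun hmem => ha.2 (h a hmem)⟩
  · simp [(admB_iff grid x).mpr hAdm, hxV]
  · simp [hxW]

theorem Fcnt_le_total (grid : List (List Int)) (V : List (Int × Int)) :
    Fcnt grid V ≤ grid.length * (grid.getD 0 []).length := by
  calc Fcnt grid V ≤ (allCells grid).length := List.countP_le_length
  _ = grid.length * (grid.getD 0 []).length := by
      simp [allCells, List.length_flatMap, PySem.List.length_pyRange_one]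

theorem dfs_fold_true (grid : List (List Int)) (target : Int × Int) (fuel : Nat) (l : List (Int × Int)) :
    ∀ (st : Bool × PySem.Set (Int × Int)),
    (l.foldl (fun st m => if st.1 then st else dfsA grid target fuel m.1 m.2 st.2) st).1 = true →
    st.1 = true ∨ ∃ m ∈ l, ∃ W, (dfsA grid target fuel m.1 m.2 W).1 = true := by
  induction l with
  | nil => intro st h; exact Or.inl h
  | cons m ms ih =>
    intro st h
    simp only [List.foldl_cons] at h
    by_cases hst : st.1 = true
    · exact Or.inl hst
    · rw [if_neg hst] at h
      rcases ih _ h with htrue | ⟨m', hm', W, hW⟩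
      · exact Or.inr ⟨m, List.mem_cons_self, st.2, htrue⟩
      · exact Or.inr ⟨m', List.mem_cons_of_mem _ hm', W, hW⟩

theorem dfs_sound (grid : List (List Int)) (target : Int × Int) :
    ∀ fuel (r c : Int) (V : PySem.Set (Int × Int)),
    (dfsA grid target fuel r c V).1 = true → ReachR grid (r, c) target := by
  intro fuel
  induction fuel with
  | zero => intro r c V h; simp [dfsA] at h
  | succ fuel ih =>
    intro r c V h
    rw [dfsA] at h
    by_cases htgt : (r, c) = target
    · exact htgt ▸ Relation.ReflTransGen.refl
    · rw [if_neg htgt] at h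
      rcases dfs_fold_true grid target fuel _ _ h with h0 | ⟨m, hm, W, hW⟩
      · simp at h0
      · have hstep := (mem_nextMoves grid (r, c) _ m).mp hm
        have hreach : ReachR grid m target := by
          have := ih m.1 m.2 W hW
          rwa [Prod.mk.eta] at this
        exact Relation.ReflTransGen.head ⟨hstep.1, hstep.2.1⟩ hreach

def DfsSpec (grid : List (List Int)) (target : Int × Int) (fuel : Nat) : Prop :=
  ∀ (r c : Int) (V : PySem.Set (Int × Int)),
    Adm grid (r, c) → target ∉ V →
    2 * Fcnt grid V + (if (r, c) ∈ V then 1 else 0) + 1 ≤ fuel →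
    (dfsA grid target fuel r c V).1 = false →
    (∀ x ∈ V, x ∈ (dfsA grid target fuel r c V).2) ∧
    (r, c) ∈ (dfsA grid target fuel r c V).2 ∧
    target ∉ (dfsA grid target fuel r c V).2 ∧
    (∀ x, (x = (r, c) ∨ (x ∈ (dfsA grid target fuel r c V).2 ∧ x ∉ V)) →
      ∀ y, StepR grid x y → y ∈ (dfsA grid target fuel r c V).2)

theorem dfs_fold_stays_true (grid : List (List Int)) (target : Int × Int) (fuel : Nat)
    (l : List (Int × Int)) (st : Bool × PySem.Set (Int × Int)) (h : st.1 = true) :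
    l.foldl (fun st m => if st.1 then st else dfsA grid target fuel m.1 m.2 st.2) st = st := by
  induction l with
  | nil => rfl
  | cons m ms ih => simp only [List.foldl_cons, if_pos h]; exact ih

theorem dfs_fold_spec (grid : List (List Int)) (target : Int × Int) (fuel : Nat)
    (hIH : DfsSpec grid target fuel) (V : PySem.Set (Int × Int)) (p : Int × Int)
    (hpAdm : Adm grid p)
    (hfuel : 2 * Fcnt grid V + (if p ∈ V then 1 else 0) ≤ fuel) :
    ∀ (l : List (Int × Int)) (W : PySem.Set (Int × Int)),
    (∀ m ∈ l, Adm grid m ∧ m ∉ V ∧ m ≠ p) →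
    (∀ x ∈ V, x ∈ W) → p ∈ W → target ∉ W →
    (l.foldl (fun st m => if st.1 then st else dfsA grid target fuel m.1 m.2 st.2) (false, W)).1 = false →
    ((∀ x ∈ W, x ∈ (l.foldl (fun st m => if st.1 then st else dfsA grid target fuel m.1 m.2 st.2) (false, W)).2) ∧
     target ∉ (l.foldl (fun st m => if st.1 then st else dfsA grid target fuel m.1 m.2 st.2) (false, W)).2 ∧
     (∀ m ∈ l, m ∈ (l.foldl (fun st m => if st.1 then st else dfsA grid target fuel m.1 m.2 st.2) (false, W)).2) ∧
     (∀ x, x ∈ (l.foldl (fun st m => if st.1 then st else dfsA grid target fuel m.1 m.2 st.2) (false, W)).2 → x ∉ W →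
       ∀ y, StepR grid x y → y ∈ (l.foldl (fun st m => if st.1 then st else dfsA grid target fuel m.1 m.2 st.2) (false, W)).2)) := by
  intro l
  induction l with
  | nil =>
    intro W _ hVW _ htW hfold
    refine ⟨fun x hx => hx, htW, by simp, ?_⟩
    intro x hx hnx
    exact absurd hx hnx
  | cons m ms ih =>
    intro W hl hVW hpW htW hfold
    simp only [List.foldl_cons, Bool.false_eq_true, if_false] at hfold ⊢
    obtain ⟨hmAdm, hmV, hmp⟩ := hl m List.mem_cons_self
    have hb1 : (dfsA grid target fuel m.1 m.2 W).1 = false := by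
      by_contra hb
      rw [Bool.not_eq_false] at hb
      have heq : dfsA grid target fuel m.1 m.2 W = (true, (dfsA grid target fuel m.1 m.2 W).2) := by
        rw [← hb]
      rw [heq, dfs_fold_stays_true grid target fuel ms _ rfl] at hfold
      simp at hfold
    have hbound : 2 * Fcnt grid W + (if (m.1, m.2) ∈ W then 1 else 0) + 1 ≤ fuel := by
      by_cases hpV : p ∈ V
      · rw [if_pos hpV] at hfuel
        by_cases hmW : m ∈ W
        · have hlt := Fcnt_lt_of_ssubset grid hVW hmAdm hmW hmV
          have : (m.1, m.2) = m := rfl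
          rw [this, if_pos hmW]
          omega
        · have hle := Fcnt_le_of_subset grid hVW
          have : (m.1, m.2) = m := rfl
          rw [this, if_neg hmW]
          omega
      · rw [if_neg hpV] at hfuel
        have hlt := Fcnt_lt_of_ssubset grid hVW hpAdm hpW hpV
        have : (m.1, m.2) = m := rfl
        rw [this]
        split <;> omega
    have hmAdm' : Adm grid (m.1, m.2) := hmAdm
    have hchild := hIH m.1 m.2 W hmAdm' htW hbound hb1
    obtain ⟨hsub1, hmem1, htW1, hclosed1⟩ := hchild
    have hres1 : dfsA grid target fuel m.1 m.2 W = (false, (dfsA grid target fuel m.1 m.2 W).2) := by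
      rw [← hb1]
    rw [hres1] at hfold ⊢
    have hih := ih (dfsA grid target fuel m.1 m.2 W).2
      (fun m' hm' => hl m' (List.mem_cons_of_mem _ hm'))
      (fun x hx => hsub1 x (hVW x hx)) (hsub1 p hpW) htW1 hfold
    obtain ⟨isub, itW, imem, iclosed⟩ := hih
    refine ⟨fun x hx => isub x (hsub1 x hx), itW, ?_, ?_⟩
    · intro m' hm'
      rcases List.mem_cons.mp hm' with heq | hm'
      · subst heq; exact isub _ hmem1
      · exact imem m' hm'
    · intro x hx hnxW y hstep
      by_cases hx1 : x ∈ (dfsA grid target fuel m.1 m.2 W).2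
      · exact isub y (hclosed1 x (Or.inr ⟨hx1, hnxW⟩) y hstep)
      · exact iclosed x hx hx1 y hstep

theorem dfs_spec_all (grid : List (List Int)) (target : Int × Int) :
    ∀ fuel, DfsSpec grid target fuel := by
  intro fuel
  induction fuel with
  | zero => intro r c V _ _ hfuel _; omega
  | succ fuel ih =>
    intro r c V hAdm htV hfuel hfalse
    rw [dfsA] at hfalse ⊢
    by_cases htgt : (r, c) = target
    · rw [if_pos htgt] at hfalse; simp at hfalse
    · rw [if_neg htgt] at hfalse ⊢
      have htV1 : target ∉ PySem.Set.add V (r, c) := by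
        rw [PySem.Set.mem_add _ _ _]
        rintro (h | h)
        · exact htV h
        · exact htgt h.symm
      have hVsub : ∀ x ∈ V, x ∈ PySem.Set.add V (r, c) := fun x hx => (PySem.Set.mem_add _ _ _).mpr (Or.inl hx)
      have hpmem : (r, c) ∈ PySem.Set.add V (r, c) := (PySem.Set.mem_add _ _ _).mpr (Or.inr rfl)
      have hl : ∀ m ∈ nextMoves (r, c) grid (PySem.Set.add V (r, c)), Adm grid m ∧ m ∉ V ∧ m ≠ (r, c) := by
        intro m hm
        obtain ⟨hn, hA, hnm⟩ := (mem_nextMoves grid (r, c) _ m).mp hm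
        rw [PySem.Set.mem_add _ _ _] at hnm
        exact ⟨hA, fun h => hnm (Or.inl h), fun h => hnm (Or.inr h)⟩
      have hfold := dfs_fold_spec grid target fuel ih V (r, c) hAdm (by omega)
        (nextMoves (r, c) grid (PySem.Set.add V (r, c))) (PySem.Set.add V (r, c))
        hl hVsub hpmem htV1 hfalse
      obtain ⟨fsub, ftW, fmem, fclosed⟩ := hfold
      refine ⟨fun x hx => fsub x (hVsub x hx), fsub _ hpmem, ftW, ?_⟩
      intro x hx y hstep
      rcases hx with rfl | ⟨hxres, hxV⟩
      · obtain ⟨hyn, hyA⟩ := hstep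
        by_cases hyV1 : y ∈ PySem.Set.add V (r, c)
        · exact fsub y hyV1
        · exact fmem y ((mem_nextMoves grid (r, c) _ y).mpr ⟨hyn, hyA, hyV1⟩)
      · by_cases hxV1 : x ∈ PySem.Set.add V (r, c)
        · rcases (PySem.Set.mem_add _ _ _).mp hxV1 with h | h
          · exact absurd h hxV
          · subst h
            obtain ⟨hyn, hyA⟩ := hstep
            by_cases hyV1 : y ∈ PySem.Set.add V (r, c)
            · exact fsub y hyV1
            · exact fmem y ((mem_nextMoves grid (r, c) _ y).mpr ⟨hyn, hyA, hyV1⟩)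
        · exact fclosed x hxres hxV1 y hstep

theorem dfs_complete (grid : List (List Int)) (target : Int × Int) (r c : Int)
    (hAdm : Adm grid (r, c))
    (h : (dfsA grid target (2 * grid.length * (grid.getD 0 []).length + 2) r c PySem.Set.empty).1 = false) :
    ¬ ReachR grid (r, c) target := by
  intro hreach
  have hbound : 2 * Fcnt grid PySem.Set.empty + (if (r, c) ∈ (PySem.Set.empty : PySem.Set (Int × Int)) then 1 else 0) + 1 ≤
      2 * grid.length * (grid.getD 0 []).length + 2 := by
    have h1 := Fcnt_le_total grid PySem.Set.empty
    have h2 : (r, c) ∉ (PySem.Set.empty : PySem.Set (Int × Int)) := List.not_mem_nil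
    rw [if_neg h2]
    have h3 : 2 * grid.length * (grid.getD 0 []).length = 2 * (grid.length * (grid.getD 0 []).length) := by ring
    omega
  obtain ⟨hsub, hp, htV, hclosed⟩ := dfs_spec_all grid target _ r c PySem.Set.empty hAdm List.not_mem_nil hbound h
  have hall : ∀ q, ReachR grid (r, c) q → q ∈ (dfsA grid target (2 * grid.length * (grid.getD 0 []).length + 2) r c PySem.Set.empty).2 := by
    intro q hq
    induction hq with
    | refl => exact hp
    | @tail b q' hab hbc ihq => exact hclosed b (Or.inr ⟨ihq, List.not_mem_nil⟩) q' hbc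
  exact htV (hall target hreach)

theorem canMove_iff (grid : List (List Int)) (r c : Int) (hAdm : Adm grid (r, c)) :
    canMoveSafely (r, c) grid = true ↔
    ReachR grid (r, c) ((grid.length : Int) - 1, ((grid.getD 0 []).length : Int) - 1) := by
  constructor
  · intro h
    exact dfs_sound grid _ _ r c PySem.Set.empty h
  · intro h
    by_contra hfalse
    rw [Bool.not_eq_true] at hfalse
    exact dfs_complete grid _ r c hAdm hfalse h

theorem reach_adm_end (grid : List (List Int)) {p q : Int × Int} (h : ReachR grid p q) :
    p = q ∨ Adm grid q := by
  induction h with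
  | refl => exact Or.inl rfl
  | tail _ hbc _ => exact Or.inr hbc.2

theorem nbrs_symm {p q : Int × Int} (h : q ∈ nbrs p) : p ∈ nbrs q := by
  simp only [nbrs, List.mem_cons, List.not_mem_nil, or_false, Prod.ext_iff] at h ⊢
  omega

theorem reach_symm (grid : List (List Int)) {p q : Int × Int} (hp : Adm grid p)
    (h : ReachR grid p q) : ReachR grid q p := by
  induction h with
  | refl => exact Relation.ReflTransGen.refl
  | @tail b q' hab hbc ih =>
    have hbAdm : Adm grid b := by
      rcases reach_adm_end grid hab with h1 | h1
      · exact h1 ▸ hp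
      · exact h1
    exact Relation.ReflTransGen.head ⟨nbrs_symm hbc.1, hbAdm⟩ ih

def bstep (grid : List (List Int)) (rows cols : Int) :
    (PySem.Set (Int × Int) × List (Int × Int)) → (Int × Int) → (PySem.Set (Int × Int) × List (Int × Int)) :=
  fun st q =>
    if 0 ≤ q.1 ∧ q.1 < rows ∧ 0 ≤ q.2 ∧ q.2 < cols ∧
        (grid.getD q.1.toNat []).getD q.2.toNat 0 = 1 ∧ q ∉ st.1
    then (PySem.Set.add st.1 q, q :: st.2) else st

theorem bfsSeen_cons (grid : List (List Int)) (rows cols : Int) (fuel : Nat) (r c : Int)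
    (rest : List (Int × Int)) (seen : PySem.Set (Int × Int)) :
    bfsSeen grid rows cols (fuel + 1) ((r, c) :: rest) seen =
    bfsSeen grid rows cols fuel ((nbrs (r, c)).foldl (bstep grid rows cols) (seen, rest)).2
      ((nbrs (r, c)).foldl (bstep grid rows cols) (seen, rest)).1 := rfl

theorem bfs_fold_spec (grid : List (List Int)) (rows cols : Int)
    (hrows : rows = (grid.length : Int)) (hcols : cols = ((grid.getD 0 []).length : Int))
    (target : Int × Int) :
    ∀ (l : List (Int × Int)) (S : PySem.Set (Int × Int)) (Fr : List (Int × Int)),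
    ((∀ x ∈ S, x ∈ (l.foldl (bstep grid rows cols) (S, Fr)).1) ∧
      (∀ x ∈ (l.foldl (bstep grid rows cols) (S, Fr)).1, x ∈ S ∨ (Adm grid x ∧ x ∈ (l.foldl (bstep grid rows cols) (S, Fr)).2)) ∧
      (∀ x ∈ Fr, x ∈ (l.foldl (bstep grid rows cols) (S, Fr)).2) ∧
      (∀ x ∈ (l.foldl (bstep grid rows cols) (S, Fr)).2, x ∈ Fr ∨ x ∈ (l.foldl (bstep grid rows cols) (S, Fr)).1) ∧
      (Fr.Nodup → (∀ x ∈ Fr, x ∈ S) → (l.foldl (bstep grid rows cols) (S, Fr)).2.Nodup ∧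
        (∀ x ∈ (l.foldl (bstep grid rows cols) (S, Fr)).2, x ∈ (l.foldl (bstep grid rows cols) (S, Fr)).1)) ∧
      ((l.foldl (bstep grid rows cols) (S, Fr)).2.length + Fcnt grid (l.foldl (bstep grid rows cols) (S, Fr)).1 ≤ Fr.length + Fcnt grid S) ∧
      (∀ q ∈ l, Adm grid q → q ∈ (l.foldl (bstep grid rows cols) (S, Fr)).1) ∧
      ((∀ x ∈ S, ReachR grid target x) → (∀ q ∈ l, Adm grid q → ReachR grid target q) →
        ∀ x ∈ (l.foldl (bstep grid rows cols) (S, Fr)).1, ReachR grid target x)) := by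
  intro l
  induction l with
  | nil =>
    intro S Fr
    exact ⟨fun x hx => hx, fun x hx => Or.inl hx, fun x hx => hx, fun x hx => Or.inl hx,
      fun hnd hsub => ⟨hnd, hsub⟩, le_refl _, by simp, fun h _ => h⟩
  | cons q l' ih =>
    intro S Fr
    simp only [List.foldl_cons]
    have hcond : (0 ≤ q.1 ∧ q.1 < rows ∧ 0 ≤ q.2 ∧ q.2 < cols ∧
        (grid.getD q.1.toNat []).getD q.2.toNat 0 = 1 ∧ q ∉ S) ↔ (Adm grid q ∧ q ∉ S) := by
      rw [hrows, hcols, Adm]; tauto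
    by_cases hc : Adm grid q ∧ q ∉ S
    · rw [show bstep grid rows cols (S, Fr) q = (PySem.Set.add S q, q :: Fr) from by
        rw [bstep]; exact if_pos (hcond.mpr hc)]
      obtain ⟨hqAdm, hqS⟩ := hc
      obtain ⟨i1, i2, i3, i4, i5, i6, i7, i8⟩ := ih (PySem.Set.add S q) (q :: Fr)
      refine ⟨?_, ?_, ?_, ?_, ?_, ?_, ?_, ?_⟩
      · exact fun x hx => i1 x ((PySem.Set.mem_add _ _ _).mpr (Or.inl hx))
      · intro x hx
        rcases i2 x hx with h1 | h1
        · rcases (PySem.Set.mem_add _ _ _).mp h1 with h2 | h2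
          · exact Or.inl h2
          · exact Or.inr ⟨h2 ▸ hqAdm, h2 ▸ i3 q List.mem_cons_self⟩
        · exact Or.inr h1
      · exact fun x hx => i3 x (List.mem_cons_of_mem _ hx)
      · intro x hx
        rcases i4 x hx with h1 | h1
        · rcases List.mem_cons.mp h1 with h2 | h2
          · exact Or.inr (h2 ▸ i1 q ((PySem.Set.mem_add _ _ _).mpr (Or.inr rfl)))
          · exact Or.inl h2
        · exact Or.inr h1
      · intro hnd hsub
        have hqFr : q ∉ Fr := fun h => hqS (hsub q h)
        exact i5 (List.nodup_cons.mpr ⟨hqFr, hnd⟩)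
          (fun x hx => by
            rcases List.mem_cons.mp hx with h2 | h2
            · exact (PySem.Set.mem_add _ _ _).mpr (Or.inr h2)
            · exact (PySem.Set.mem_add _ _ _).mpr (Or.inl (hsub x h2)))
      · have hlt : Fcnt grid (PySem.Set.add S q) < Fcnt grid S :=
          Fcnt_lt_of_ssubset grid (fun x hx => (PySem.Set.mem_add _ _ _).mpr (Or.inl hx))
            hqAdm ((PySem.Set.mem_add _ _ _).mpr (Or.inr rfl)) hqS
        have h6 := i6
        simp only [List.length_cons] at h6
        omega
      · intro q' hq' hq'Adm
        rcases List.mem_cons.mp hq' with h2 | h2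
        · exact h2 ▸ i1 q ((PySem.Set.mem_add _ _ _).mpr (Or.inr rfl))
        · exact i7 q' h2 hq'Adm
      · intro hS hl
        refine i8 ?_ (fun q' hq' => hl q' (List.mem_cons_of_mem _ hq'))
        intro x hx
        rcases (PySem.Set.mem_add _ _ _).mp hx with h2 | h2
        · exact hS x h2
        · exact h2 ▸ hl q List.mem_cons_self hqAdm
    · rw [show bstep grid rows cols (S, Fr) q = (S, Fr) from by
        rw [bstep]; exact if_neg (fun h => hc (hcond.mp h))]
      obtain ⟨i1, i2, i3, i4, i5, i6, i7, i8⟩ := ih S Fr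
      refine ⟨i1, i2, i3, i4, i5, i6, ?_, ?_⟩
      · intro q' hq' hq'Adm
        rcases List.mem_cons.mp hq' with h2 | h2
        · subst h2
          have hqS : q' ∈ S := by
            by_contra hqS
            exact hc ⟨hq'Adm, hqS⟩
          exact i1 q' hqS
        · exact i7 q' h2 hq'Adm
      · exact fun hS hl => i8 hS (fun q' hq' => hl q' (List.mem_cons_of_mem _ hq'))

theorem bfs_loop_spec (grid : List (List Int)) (rows cols : Int)
    (hrows : rows = (grid.length : Int)) (hcols : cols = ((grid.getD 0 []).length : Int))
    (target : Int × Int) :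
    ∀ (fuel : Nat) (frontier : List (Int × Int)) (seen : PySem.Set (Int × Int)),
    frontier.length + Fcnt grid seen + 1 ≤ fuel →
    frontier.Nodup → (∀ x ∈ frontier, x ∈ seen) →
    (∀ x ∈ seen, ReachR grid target x) →
    (∀ x ∈ seen, x ∉ frontier → ∀ y, StepR grid x y → y ∈ seen) →
    ((∀ x ∈ seen, x ∈ bfsSeen grid rows cols fuel frontier seen) ∧
     (∀ x ∈ bfsSeen grid rows cols fuel frontier seen, ReachR grid target x) ∧
     (∀ x ∈ bfsSeen grid rows cols fuel frontier seen, ∀ y, StepR grid x y →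
       y ∈ bfsSeen grid rows cols fuel frontier seen)) := by
  intro fuel
  induction fuel with
  | zero => intro frontier seen hfuel; omega
  | succ fuel ih =>
    intro frontier seen hfuel hnd hfr hreach hclosed
    match frontier, hfuel, hnd, hfr, hclosed with
    | [], _, _, _, hclosed =>
      rw [bfsSeen]
      exact ⟨fun x hx => hx, hreach, fun x hx y hstep => hclosed x hx List.not_mem_nil y hstep⟩
    | (r, c) :: rest, hfuel, hnd, hfr, hclosed =>
      rw [bfsSeen_cons]
      obtain ⟨f1, f2, f3, f4, f5, f6, f7, f8⟩ :=
        bfs_fold_spec grid rows cols hrows hcols target (nbrs (r, c)) seen rest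
      obtain ⟨hnd2, hsub2⟩ := f5 (List.nodup_cons.mp hnd).2 (fun x hx => hfr x (List.mem_cons_of_mem _ hx))
      have hreach' := f8 hreach (fun q hq hA =>
        Relation.ReflTransGen.tail (hreach (r, c) (hfr (r, c) List.mem_cons_self)) ⟨hq, hA⟩)
      have hclosed' : ∀ x ∈ ((nbrs (r, c)).foldl (bstep grid rows cols) (seen, rest)).1,
          x ∉ ((nbrs (r, c)).foldl (bstep grid rows cols) (seen, rest)).2 →
          ∀ y, StepR grid x y → y ∈ ((nbrs (r, c)).foldl (bstep grid rows cols) (seen, rest)).1 := by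
        intro x hx hxFr y hstep
        rcases f2 x hx with hxseen | ⟨_, hxFr'⟩
        · by_cases hxrc : x = (r, c)
          · subst hxrc
            exact f7 y hstep.1 hstep.2
          · have hxrest : x ∉ rest := fun h => hxFr (f3 x h)
            have hxfront : x ∉ (r, c) :: rest := by
              intro h
              rcases List.mem_cons.mp h with h2 | h2
              · exact hxrc h2
              · exact hxrest h2
            exact f1 y (hclosed x hxseen hxfront y hstep)
        · exact absurd hxFr' hxFr
      have hfuel' : ((nbrs (r, c)).foldl (bstep grid rows cols) (seen, rest)).2.length +
          Fcnt grid ((nbrs (r, c)).foldl (bstep grid rows cols) (seen, rest)).1 + 1 ≤ fuel := by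
        simp only [List.length_cons] at hfuel
        omega
      obtain ⟨g1, g2, g3⟩ := ih _ _ hfuel' hnd2 hsub2 hreach' hclosed'
      exact ⟨fun x hx => g1 x (f1 x hx), g2, g3⟩

theorem bfs_char (grid : List (List Int))
    (hT : Adm grid ((grid.length : Int) - 1, ((grid.getD 0 []).length : Int) - 1)) :
    ∀ x, x ∈ bfsSeen grid (grid.length : Int) ((grid.getD 0 []).length : Int)
        (grid.length * (grid.getD 0 []).length + 1)
        [((grid.length : Int) - 1, ((grid.getD 0 []).length : Int) - 1)]
        (PySem.Set.add PySem.Set.empty ((grid.length : Int) - 1, ((grid.getD 0 []).length : Int) - 1)) ↔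
      ReachR grid ((grid.length : Int) - 1, ((grid.getD 0 []).length : Int) - 1) x := by
  set T : Int × Int := ((grid.length : Int) - 1, ((grid.getD 0 []).length : Int) - 1) with hTdef
  have hmem0 : ∀ x, x ∈ PySem.Set.add (PySem.Set.empty : PySem.Set (Int × Int)) T ↔ x = T := by
    intro x
    rw [PySem.Set.mem_add _ _ _]
    simp [PySem.Set.empty]
  have hfuel : (1 : Nat) + Fcnt grid (PySem.Set.add PySem.Set.empty T) + 1 ≤
      grid.length * (grid.getD 0 []).length + 1 := by
    have hlt : Fcnt grid (PySem.Set.add PySem.Set.empty T) < Fcnt grid PySem.Set.empty :=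
      Fcnt_lt_of_ssubset grid (fun x hx => absurd hx List.not_mem_nil) hT
        ((hmem0 T).mpr rfl) List.not_mem_nil
    have hle := Fcnt_le_total grid PySem.Set.empty
    omega
  obtain ⟨g1, g2, g3⟩ := bfs_loop_spec grid (grid.length : Int) ((grid.getD 0 []).length : Int)
    rfl rfl T (grid.length * (grid.getD 0 []).length + 1) [T] (PySem.Set.add PySem.Set.empty T)
    hfuel (List.nodup_singleton _) (fun x hx => (hmem0 x).mpr (List.mem_singleton.mp hx))
    (fun x hx => ((hmem0 x).mp hx) ▸ Relation.ReflTransGen.refl)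
    (fun x hx hnx => absurd (List.mem_singleton.mpr ((hmem0 x).mp hx)) hnx)
  intro x
  constructor
  · exact g2 x
  · intro hreach
    have hTmem := g1 T ((hmem0 T).mpr rfl)
    clear hfuel hmem0 g1 g2
    induction hreach with
    | refl => exact hTmem
    | @tail b q' hab hbc ihq => exact g3 b ihq q' hbc

theorem foldl_append_if_eq {α β : Type} (l : List α) (f : α → β) (P : α → Prop) [DecidablePred P] :
    ∀ (acc : List β),
    l.foldl (fun acc x => if P x then acc ++ [f x] else acc) acc =
      acc ++ (l.filter (fun x => decide (P x))).map f := by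
  induction l with
  | nil => intro acc; simp
  | cons x xs ih =>
    intro acc
    simp only [List.foldl_cons, List.filter_cons]
    by_cases hx : P x
    · rw [if_pos hx, ih]
      simp [hx]
    · rw [if_neg hx, ih]
      simp [hx]

theorem a_reshape (grid : List (List Int)) :
    list_all_escape_routes grid =
    (PySem.List.pyRange 0 (grid.length : Int) 1).flatMap (fun row =>
      ((PySem.List.pyRange 0 ((grid.getD 0 []).length : Int) 1).filter (fun col =>
        decide ((grid.getD row.toNat []).getD col.toNat 0 = 1 ∧ canMoveSafely (row, col) grid = true))).map
        (fun col => (row, col))) := by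
  rw [list_all_escape_routes]
  have h1 := PySem.List.foldl_congr_mem (PySem.List.pyRange 0 (grid.length : Int) 1)
    (fun escape_routes row =>
      (PySem.List.pyRange 0 ((grid.getD 0 []).length : Int) 1).foldl (fun escape_routes col =>
        if (grid.getD row.toNat []).getD col.toNat 0 = 1 ∧ canMoveSafely (row, col) grid = true then
          escape_routes ++ [(row, col)]
        else escape_routes) escape_routes)
    (fun acc row => acc ++
      ((PySem.List.pyRange 0 ((grid.getD 0 []).length : Int) 1).filter (fun col =>
        decide ((grid.getD row.toNat []).getD col.toNat 0 = 1 ∧ canMoveSafely (row, col) grid = true))).map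
        (fun col => (row, col))) []
    (fun acc row _ =>
      foldl_append_if_eq (PySem.List.pyRange 0 ((grid.getD 0 []).length : Int) 1)
        (fun col => (row, col))
        (fun col => (grid.getD row.toNat []).getD col.toNat 0 = 1 ∧ canMoveSafely (row, col) grid = true) acc)
  rw [h1, PySem.List.foldl_append_eq_flatMap]
  simp

theorem main_eq (grid : List (List Int)) :
    list_all_escape_routes grid = list_all_escape_routes_alt grid := by
  by_cases hC : (grid.getD 0 []).length = 0
  · rw [a_reshape, list_all_escape_routes_alt]
    rw [if_pos (Or.inl (by exact_mod_cast hC))]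
    have h0 : PySem.List.pyRange 0 ((grid.getD 0 []).length : Int) 1 = [] := by
      rw [hC]; rfl
    rw [h0]
    simp
  · by_cases hT1 : (grid.getD ((grid.length : Int) - 1).toNat []).getD
        (((grid.getD 0 []).length : Int) - 1).toNat 0 = 1
    · have hR : 0 < grid.length := by
        cases grid with
        | nil => simp at hC
        | cons a l => simp
      have hTAdm : Adm grid ((grid.length : Int) - 1, ((grid.getD 0 []).length : Int) - 1) :=
        ⟨by omega, by omega, by omega, by omega, hT1⟩
      rw [a_reshape, list_all_escape_routes_alt]
      rw [if_neg (by
        rintro (h | h)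
        · rw [Int.natCast_eq_zero] at h
          exact hC h
        · exact h hT1)]
      apply List.flatMap_congr
      intro row hrow
      obtain ⟨hrow1, hrow2⟩ := PySem.List.mem_pyRange_one.mp hrow
      apply congrArg
      apply List.filter_congr
      intro col hcol
      obtain ⟨hcol1, hcol2⟩ := PySem.List.mem_pyRange_one.mp hcol
      rw [decide_eq_decide]
      constructor
      · rintro ⟨hcell, hcan⟩
        have hAdm : Adm grid (row, col) := ⟨hrow1, hrow2, hcol1, hcol2, hcell⟩
        exact (bfs_char grid hTAdm (row, col)).mpr
          (reach_symm grid hAdm ((canMove_iff grid row col hAdm).mp hcan))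
      · intro hQ
        have hreach := (bfs_char grid hTAdm (row, col)).mp hQ
        have hcell : (grid.getD row.toNat []).getD col.toNat 0 = 1 := by
          rcases reach_adm_end grid hreach with he | hA
          · have h1 := congrArg Prod.fst he
            have h2 := congrArg Prod.snd he
            simp only at h1 h2
            rw [← h1, ← h2]
            exact hT1
          · exact hA.2.2.2.2
        have hAdm : Adm grid (row, col) := ⟨hrow1, hrow2, hcol1, hcol2, hcell⟩
        exact ⟨hcell, (canMove_iff grid row col hAdm).mpr (reach_symm grid hTAdm hreach)⟩
    · rw [a_reshape, list_all_escape_routes_alt, if_pos (Or.inr hT1)]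
      apply List.flatMap_eq_nil_iff.mpr
      intro row hrow
      obtain ⟨hrow1, hrow2⟩ := PySem.List.mem_pyRange_one.mp hrow
      rw [List.map_eq_nil_iff]
      apply List.filter_eq_nil_iff.mpr
      intro col hcol hcond
      obtain ⟨hcol1, hcol2⟩ := PySem.List.mem_pyRange_one.mp hcol
      rw [decide_eq_true_eq] at hcond
      obtain ⟨hcell, hcan⟩ := hcond
      have hAdm : Adm grid (row, col) := ⟨hrow1, hrow2, hcol1, hcol2, hcell⟩
      have hreach := (canMove_iff grid row col hAdm).mp hcan
      rcases reach_adm_end grid hreach with he | hA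
      · have h1 := congrArg Prod.fst he
        have h2 := congrArg Prod.snd he
        simp only at h1 h2
        rw [h1, h2] at hcell
        exact hT1 hcell
      · exact hT1 hA.2.2.2.2

-- ===== VERDICT (by name: the statement is the Claim_ definition above) =====
theorem list_all_escape_routes_spec : Claim_equal_list_all_escape_routes := by
  intro grid _ _
  show list_all_escape_routes grid = list_all_escape_routes_alt grid
  exact main_eq grid
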